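-- pv_equiv track=rewrite | github.com/mikhaaiil/CodeRunBoostChallenge | welcoming_7165.py | solution
-- ===== SOURCE A (Python) =====
-- import math
--
-- def solution(n, m):
--     low = 0
--     high = int(math.isqrt(n + m))
--     best_k = 0
--     while low <= high:
--         mid = (low + high) // 2
--         half = (mid * mid + 1) // 2
--         other_half = (mid * mid) // 2
--         if (n >= half and m >= other_half) or (m >= half and n >= other_half):
--             best_k = mid
--             low = mid + 1
--         else:
--             high = mid - 1
--     return best_k
-- ===== SOURCE B (Python) =====
-- import math
--
-- def solution(n, m):
--     best_k = 0
--     for k in range(1, math.isqrt(n + m) + 1):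
--         half = (k * k + 1) // 2
--         other_half = (k * k) // 2
--         if (n >= half and m >= other_half) or (m >= half and n >= other_half):
--             best_k = k
--         else:
--             break
--     return best_k
-- ===== Notes on version B (the rewrite author's own statement) =====
-- stated objective: simpler
-- what changed: Replaces the binary search over k with a linear upward scan from k=1 that stops at the first infeasible k (the feasibility predicate is monotone in k).
import Mathlib
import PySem

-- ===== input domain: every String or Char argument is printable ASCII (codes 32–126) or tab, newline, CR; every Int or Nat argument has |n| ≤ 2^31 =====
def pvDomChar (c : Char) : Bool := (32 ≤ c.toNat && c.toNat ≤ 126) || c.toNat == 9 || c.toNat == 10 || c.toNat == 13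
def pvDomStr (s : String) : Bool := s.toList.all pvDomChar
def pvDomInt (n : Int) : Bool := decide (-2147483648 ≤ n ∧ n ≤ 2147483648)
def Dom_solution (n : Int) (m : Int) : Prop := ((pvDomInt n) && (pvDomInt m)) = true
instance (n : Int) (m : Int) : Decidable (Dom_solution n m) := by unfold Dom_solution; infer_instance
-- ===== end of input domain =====

-- B replaces A's binary search by a linear upward scan over k that breaks at the first
-- infeasible k (objective: simpler). Return values agree on all n, m with 0 ≤ n + m.

-- math.isqrt(x): exact for 0 ≤ x (Pre_solution); math.isqrt raises ValueError for x < 0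
def pyIsqrt (x : Int) : Int := ((x.toNat).sqrt : Int)

-- the shared feasibility test '(n >= half and m >= other_half) or (m >= half and n >= other_half)'
def pvFeas (n m k : Int) : Bool :=
  let half := PySem.Int.floordiv (k * k + 1) 2
  let other_half := PySem.Int.floordiv (k * k) 2
  (decide (n ≥ half) && decide (m ≥ other_half)) || (decide (m ≥ half) && decide (n ≥ other_half))

-- ===== PORT A =====
def solutionGo (n m low high best : Int) : Int :=
  if _h : low ≤ high then
    let mid := PySem.Int.floordiv (low + high) 2
    if pvFeas n m mid then solutionGo n m (mid + 1) high mid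
    else solutionGo n m low (mid - 1) best
  else best
termination_by (high + 1 - low).toNat
decreasing_by
  · have := PySem.Int.floordiv_two_mid_bounds _h; omega
  · have := PySem.Int.floordiv_two_mid_bounds _h; omega

def solution (n : Int) (m : Int) : Int :=
  solutionGo n m 0 (pyIsqrt (n + m)) 0

-- ===== PORT B =====
def solutionAltGo (n m H k best : Int) : Int :=
  if _h : k ≤ H then
    if pvFeas n m k then solutionAltGo n m H (k + 1) k
    else best
  else best
termination_by (H + 1 - k).toNat

def solution_alt (n : Int) (m : Int) : Int :=
  solutionAltGo n m (pyIsqrt (n + m)) 1 0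

-- ===== PRECONDITION & SPEC =====
-- Pre_: math.isqrt (called by both A and B) raises ValueError when n + m < 0
def Pre_solution (n : Int) (m : Int) : Prop := 0 ≤ n + m
instance (n : Int) (m : Int) : Decidable (Pre_solution n m) := by unfold Pre_solution; infer_instance
def pvWitness_solution : Int × Int := (3, 5)

def Spec_solution (n : Int) (m : Int) (out : Int) : Prop := out = solution_alt n m
instance (n : Int) (m : Int) (out : Int) : Decidable (Spec_solution n m out) := by unfold Spec_solution; infer_instance

-- ===== CLAIM (what is proved, stated in full; the proofs are below) =====
def Claim_equal_solution : Prop := ∀ (n : Int) (m : Int), Dom_solution n m → Pre_solution n m → Spec_solution n m (solution n m)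

-- ===== LEMMAS AND PROOFS =====

-- both loops compute the unique r with: 0 ≤ r ≤ H, r feasible (or 0), and no feasible k exceeds r
def Good (n m H r : Int) : Prop :=
  0 ≤ r ∧ r ≤ H ∧ (r = 0 ∨ pvFeas n m r = true) ∧
  ∀ k, 0 ≤ k → k ≤ H → pvFeas n m k = true → k ≤ r

lemma good_unique {n m H r₁ r₂ : Int} (h₁ : Good n m H r₁) (h₂ : Good n m H r₂) : r₁ = r₂ := by
  obtain ⟨a1, b1, c1, d1⟩ := h₁
  obtain ⟨a2, b2, c2, d2⟩ := h₂
  rcases c1 with rfl | f1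
  · rcases c2 with rfl | f2
    · rfl
    · have := d1 r₂ a2 b2 f2; omega
  · rcases c2 with rfl | f2
    · have := d2 r₁ a1 b1 f1; omega
    · have := d1 r₂ a2 b2 f2
      have := d2 r₁ a1 b1 f1
      omega

lemma pvFeas_mono {n m j k : Int} (hj : 0 ≤ j) (hjk : j ≤ k) (h : pvFeas n m k = true) :
    pvFeas n m j = true := by
  have hsq : j * j ≤ k * k := mul_le_mul hjk hjk hj (by omega)
  have e1 : PySem.Int.floordiv (j * j + 1) 2 ≤ PySem.Int.floordiv (k * k + 1) 2 := by
    simp only [PySem.Int.floordiv_eq_ediv_of_pos (show (0:Int) < 2 by omega)]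
    exact Int.ediv_le_ediv (by omega) (by omega)
  have e2 : PySem.Int.floordiv (j * j) 2 ≤ PySem.Int.floordiv (k * k) 2 := by
    simp only [PySem.Int.floordiv_eq_ediv_of_pos (show (0:Int) < 2 by omega)]
    exact Int.ediv_le_ediv (by omega) hsq
  simp only [pvFeas, Bool.or_eq_true, Bool.and_eq_true, decide_eq_true_eq] at h ⊢
  omega

lemma goA_good (n m H : Int) :
    ∀ N low high best, (high + 1 - low).toNat ≤ N → 0 ≤ low → high ≤ H → best ≤ low →
      0 ≤ best → best ≤ H → (best = 0 ∨ pvFeas n m best = true) →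
      (∀ k, 0 ≤ k → k ≤ H → pvFeas n m k = true → k ≤ best ∨ (low ≤ k ∧ k ≤ high)) →
      Good n m H (solutionGo n m low high best) := by
  intro N
  induction N with
  | zero =>
    intro low high best hN h0 hH hbl hb0 hbH hbf hall
    rw [solutionGo]
    rw [dif_neg (by omega)]
    refine ⟨hb0, hbH, hbf, fun k hk0 hkH hkf => ?_⟩
    rcases hall k hk0 hkH hkf with h | h
    · exact h
    · omega
  | succ N ih =>
    intro low high best hN h0 hH hbl hb0 hbH hbf hall
    rw [solutionGo]
    by_cases hlh : low ≤ high
    · rw [dif_pos hlh]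
      have hmid := PySem.Int.floordiv_two_mid_bounds hlh
      set mid := PySem.Int.floordiv (low + high) 2 with hm
      by_cases hf : pvFeas n m mid = true
      · rw [if_pos hf]
        refine ih (mid + 1) high mid (by omega) (by omega) hH (by omega) (by omega) (by omega)
          (Or.inr hf) (fun k hk0 hkH hkf => ?_)
        rcases hall k hk0 hkH hkf with h | h
        · left; omega
        · omega
      · rw [if_neg hf]
        refine ih low (mid - 1) best (by omega) h0 (by omega) hbl hb0 hbH hbf
          (fun k hk0 hkH hkf => ?_)
        rcases hall k hk0 hkH hkf with h | h
        · left; exact h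
        · right
          refine ⟨h.1, ?_⟩
          by_contra hgt
          exact hf (pvFeas_mono (by omega) (by omega) hkf)
    · rw [dif_neg hlh]
      refine ⟨hb0, hbH, hbf, fun k hk0 hkH hkf => ?_⟩
      rcases hall k hk0 hkH hkf with h | h
      · exact h
      · omega

lemma goB_good (n m H : Int) (hH : 0 ≤ H) :
    ∀ N k, (H + 1 - k).toNat ≤ N → 1 ≤ k → k ≤ H + 1 →
      (k - 1 = 0 ∨ pvFeas n m (k - 1) = true) →
      Good n m H (solutionAltGo n m H k (k - 1)) := by
  intro N
  induction N with
  | zero =>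
    intro k hN h1 hk hbf
    rw [solutionAltGo]
    rw [dif_neg (by omega)]
    have hkH : k = H + 1 := by omega
    refine ⟨by omega, by omega, hbf, fun j hj0 hjH _ => by omega⟩
  | succ N ih =>
    intro k hN h1 hk hbf
    rw [solutionAltGo]
    by_cases hkH : k ≤ H
    · rw [dif_pos hkH]
      by_cases hf : pvFeas n m k = true
      · rw [if_pos hf]
        have e : k + 1 - 1 = k := by omega
        have h' := ih (k + 1) (by omega) (by omega) (by omega) (by rw [e]; exact Or.inr hf)
        rwa [e] at h'
      · rw [if_neg hf]
        refine ⟨by omega, by omega, hbf, fun j hj0 hjH hjf => ?_⟩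
        by_contra hgt
        exact hf (pvFeas_mono (by omega) (by omega) hjf)
    · rw [dif_neg hkH]
      have hkH' : k = H + 1 := by omega
      refine ⟨by omega, by omega, hbf, fun j hj0 hjH _ => by omega⟩

lemma pyIsqrt_nonneg (x : Int) : 0 ≤ pyIsqrt x := by
  simp [pyIsqrt]

-- ===== VERDICT (by name: the statement is the Claim_ definition above) =====
theorem solution_spec : Claim_equal_solution := by
  intro n m _ _
  unfold Spec_solution solution solution_alt
  set H := pyIsqrt (n + m) with hH
  have h0H : 0 ≤ H := pyIsqrt_nonneg _
  have hA : Good n m H (solutionGo n m 0 H 0) :=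
    goA_good n m H (H + 1 - 0).toNat 0 H 0 le_rfl le_rfl le_rfl le_rfl le_rfl h0H
      (Or.inl rfl) (fun k hk0 hkH _ => Or.inr ⟨hk0, hkH⟩)
  have hB : Good n m H (solutionAltGo n m H 1 0) := by
    have := goB_good n m H h0H H.toNat 1 (by omega) le_rfl (by omega) (Or.inl (by omega))
    simpa using this
  exact good_unique hA hB
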